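-- pv_equiv track=rewrite | github.com/nobe0716/problem_solving | codeforces/contests/1537/E1. Erase and Extend (Easy Version).py | solve
-- ===== SOURCE A (Python) =====
-- def solve(n, k, s):
--     def compose(i):
--         base = s[:i]
--         return base * (k // len(base)) + base[:k % len(base)]
--
--     ans = s[0] * k
--     # s = list(s)
--     for i in range(1, n + 1):
--         composed = compose(i)
--         ans = min(ans, composed)
--     return ans
-- ===== SOURCE B (Python) =====
-- def solve(n, k, s):
--     L = len(s)
--     m = min(n, L)
--     p = 1
--     i = 1
--     while i < m:
--         c = s[i]
--         d = s[i % p]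
--         if c > d:
--             break
--         if c < d:
--             p = i + 1
--         i += 1
--     return (s[:p] * (k // p + 1))[:k]
-- ===== Notes on version B (the rewrite author's own statement) =====
-- stated objective: faster
-- what changed: Replaces A's build-every-candidate-and-take-min loop (n candidate strings of length k, each built by slicing/repetition and compared with min) by one greedy scan that picks the optimal prefix length p (extend while s[i]<s[i%p], stop on s[i]>s[i%p]) and builds the answer string once.
import Mathlib
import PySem

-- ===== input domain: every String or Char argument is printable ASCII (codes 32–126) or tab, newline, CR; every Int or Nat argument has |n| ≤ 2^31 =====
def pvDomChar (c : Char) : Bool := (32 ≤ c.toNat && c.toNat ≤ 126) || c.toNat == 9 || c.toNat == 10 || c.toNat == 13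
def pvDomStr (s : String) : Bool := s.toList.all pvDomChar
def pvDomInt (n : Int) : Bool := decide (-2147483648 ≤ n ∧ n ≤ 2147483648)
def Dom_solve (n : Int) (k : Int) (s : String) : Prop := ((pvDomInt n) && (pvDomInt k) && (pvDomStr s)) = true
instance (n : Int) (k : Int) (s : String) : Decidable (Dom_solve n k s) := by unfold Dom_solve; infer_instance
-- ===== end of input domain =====

-- B replaces A's build-every-candidate-and-take-min loop by a greedy O(n+k) selection of the
-- optimal prefix length, building the answer once (objective: faster, asymptotic).

-- ===== PORT A =====
-- compose(i): base = s[:i]; base * (k // len(base)) + base[:k % len(base)]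
-- (len(base) = 0, i.e. s = '', is Python's ZeroDivisionError: excluded by Pre_solve; the "" branch is unreachable there)
def composeA (s : String) (k : Int) (i : Int) : String :=
  let base := (PySem.Str.slice s none (some i)).toList
  match PySem.Int.floordiv? k (base.length : Int), PySem.Int.mod? k (base.length : Int) with
  | some q, some r => String.ofList (PySem.List.pyRepeat base q ++ PySem.List.slice base none (some r))
  | _, _ => ""

def solve (n : Int) (k : Int) (s : String) : String :=
  -- s[0] on an empty s is Python's IndexError: excluded by Pre_solve; the "" branch is unreachable there
  match PySem.Str.pyGet? s 0 with
  | none => ""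
  | some c0 =>
    let ans0 := String.ofList (PySem.List.pyRepeat [c0] k)
    (PySem.List.pyRange 1 (n + 1) 1).foldl
      (fun ans i =>
        let composed := composeA s k i
        -- min(ans, composed): returns composed only when composed < ans (first argument on ties)
        if composed < ans then composed else ans)
      ans0

-- ===== PORT B =====
-- the while-loop of Source B: while i < m: c = s[i]; d = s[i % p]; if c > d: break; if c < d: p = i+1; i += 1
-- (the .getD 'a' defaults are unreachable: 0 ≤ i < m ≤ len s and 0 ≤ i % p < p ≤ len s there)
def solveAltLoop (cs : List Char) (m : Int) (i : Int) (p : Int) : Int :=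
  if h : i < m then
    let c := (PySem.List.pyGet? cs i).getD 'a'
    let d := (PySem.List.pyGet? cs (PySem.Int.mod i p)).getD 'a'
    if d < c then p
    else if c < d then solveAltLoop cs m (i + 1) (i + 1)
    else solveAltLoop cs m (i + 1) p
  else p
termination_by (m - i).toNat
decreasing_by all_goals (simp; omega)

def solve_alt (n : Int) (k : Int) (s : String) : String :=
  let cs := s.toList
  let m := min n (cs.length : Int)
  let p := solveAltLoop cs m 1 1
  -- (s[:p] * (k // p + 1))[:k], ported on the char list of s
  String.ofList (PySem.List.slice
    (PySem.List.pyRepeat (PySem.List.slice cs none (some p)) (PySem.Int.floordiv k p + 1))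
    none (some k))

-- ===== PRECONDITION & SPEC =====
-- Pre_solve excludes only s = "", where A raises (IndexError on s[0] / ZeroDivisionError in compose)
def Pre_solve (n : Int) (k : Int) (s : String) : Prop := s ≠ ""
instance (n : Int) (k : Int) (s : String) : Decidable (Pre_solve n k s) := by unfold Pre_solve; infer_instance
def pvWitness_solve : Int × Int × String := (3, 5, "cac")

def Spec_solve (n : Int) (k : Int) (s : String) (out : String) : Prop := out = solve_alt n k s
instance (n : Int) (k : Int) (s : String) (out : String) : Decidable (Spec_solve n k s out) := by unfold Spec_solve; infer_instance

-- ===== CLAIM (what is proved, stated in full; the proofs are below) =====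
def Claim_equal_solve : Prop := ∀ (n : Int) (k : Int) (s : String), Dom_solve n k s → Pre_solve n k s → Spec_solve n k s (solve n k s)

-- ===== LEMMAS AND PROOFS =====

-- x^∞ for the prefix of length p of cs, as an infinite word (position j holds cs[j % p])
def pvXw (cs : List Char) (p : ℕ) : ℕ → Char := fun j => cs.getD (j % p) 'a'

-- lexicographic ≤ on infinite words
def pvLeInf (x y : ℕ → Char) : Prop := ∀ j, (∀ u, u < j → x u = y u) → x j ≤ y j

-- first k characters of x
def pvRep (x : ℕ → Char) (K : ℕ) : List Char := (List.range K).map x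

-- Nat mirror of solveAltLoop
def pvNatLoop (cs : List Char) (M i p : ℕ) : ℕ :=
  if i < M then
    if cs.getD (i % p) 'a' < cs.getD i 'a' then p
    else if cs.getD i 'a' < cs.getD (i % p) 'a' then pvNatLoop cs M (i + 1) (i + 1)
    else pvNatLoop cs M (i + 1) p
  else p
termination_by M - i
decreasing_by all_goals omega

lemma pvLeInf_refl (x : ℕ → Char) : pvLeInf x x := fun _ _ => le_refl _

lemma pvLeInf_of_ltAt (x y : ℕ → Char) (e : ℕ)
    (hagr : ∀ u, u < e → x u = y u) (hlt : x e < y e) : pvLeInf x y := by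
  intro j hj
  rcases lt_trichotomy j e with h | h | h
  · exact le_of_eq (hagr j h)
  · exact h ▸ le_of_lt hlt
  · exact absurd (hj e h) (ne_of_lt hlt)

lemma pvLtAt_trans (x y z : ℕ → Char) (e : ℕ)
    (hagr : ∀ u, u < e → x u = y u) (hlt : x e < y e) (hyz : pvLeInf y z) : pvLeInf x z := by
  intro j hj
  rcases lt_trichotomy j e with h | h | h
  · have hyz' : ∀ u, u < j → y u = z u := fun u hu => (hagr u (hu.trans h)).symm.trans (hj u hu)
    exact le_of_eq (hagr j h) |>.trans (hyz j hyz')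
  · subst h
    have hyz' : ∀ u, u < j → y u = z u := fun u hu => (hagr u hu).symm.trans (hj u hu)
    exact le_of_lt (lt_of_lt_of_le hlt (hyz j hyz'))
  · exfalso
    have hyz' : ∀ u, u < e → y u = z u := fun u hu => (hagr u hu).symm.trans (hj u (hu.trans h))
    exact absurd (hj e h) (ne_of_lt (lt_of_lt_of_le hlt (hyz e hyz')))

lemma pvNot_lex_of_leInf (x y : ℕ → Char) (h : pvLeInf x y) (K : ℕ) :
    ¬ List.Lex (· < ·) (pvRep y K) (pvRep x K) := by
  induction K generalizing x y with
  | zero => simp [pvRep]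
  | succ K ih =>
    intro hlex
    rw [pvRep, pvRep, List.range_succ_eq_map, List.map_cons, List.map_cons,
      List.map_map, List.map_map, List.cons_lex_cons_iff] at hlex
    rcases hlex with h1 | ⟨h1, h2⟩
    · exact absurd h1 (not_lt.mpr (h 0 (by omega)))
    · have hx : pvLeInf (fun u => x (u + 1)) (fun u => y (u + 1)) := by
        intro j hj
        refine h (j + 1) ?_
        intro u hu
        cases u with
        | zero => exact h1.symm
        | succ u => exact hj u (by omega)
      exact ih _ _ hx (by simpa [pvRep, Function.comp_def, Nat.succ_eq_add_one] using h2)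

lemma pvStr_le_of_leInf (x y : ℕ → Char) (K : ℕ) (h : pvLeInf x y) :
    String.ofList (pvRep x K) ≤ String.ofList (pvRep y K) := by
  refine not_lt.mp ?_
  intro hlt
  rw [String.lt_iff_toList_lt, String.toList_ofList, String.toList_ofList] at hlt
  exact pvNot_lex_of_leInf x y h K (by simpa [List.lt_iff_lex_lt] using hlt)

-- the fold in A is a running minimum: it returns v if v is a value of the list (or the seed) and ≤ all of them
lemma pvFoldl_argmin {α : Type} (f : α → String) (l : List α) (b0 v : String)
    (hmem : v = b0 ∨ ∃ a ∈ l, f a = v) (hb0 : v ≤ b0) (hle : ∀ a ∈ l, v ≤ f a) :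
    l.foldl (fun b a => if f a < b then f a else b) b0 = v := by
  induction l generalizing b0 with
  | nil =>
    rcases hmem with h | h
    · simpa using h.symm
    · simp at h
  | cons a t ih =>
    simp only [List.foldl_cons]
    by_cases hc : f a < b0
    · simp only [if_pos hc]
      rcases hmem with h | ⟨a', ha', hfa'⟩
      · exact absurd hc (not_lt.mpr (h ▸ hle a (by simp)))
      · rcases List.mem_cons.mp ha' with rfl | ha't
        · exact ih _ (Or.inl hfa'.symm) (le_of_eq hfa'.symm) (fun b hb => hle b (by simp [hb]))
        · exact ih _ (Or.inr ⟨a', ha't, hfa'⟩) (hle a (by simp)) (fun b hb => hle b (by simp [hb]))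
    · simp only [if_neg hc]
      rcases hmem with h | ⟨a', ha', hfa'⟩
      · exact ih _ (Or.inl h) hb0 (fun b hb => hle b (by simp [hb]))
      · rcases List.mem_cons.mp ha' with rfl | ha't
        · have : v = b0 := le_antisymm hb0 (by rw [← hfa']; exact not_lt.mp hc)
          exact ih _ (Or.inl this) hb0 (fun b hb => hle b (by simp [hb]))
        · exact ih _ (Or.inr ⟨a', ha't, hfa'⟩) hb0 (fun b hb => hle b (by simp [hb]))

-- characters of repeated prefixes
lemma pvXw_eq (cs : List Char) (p j : ℕ) : pvXw cs p j = cs.getD (j % p) 'a' := rfl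

-- the period-p word is p-periodic
lemma pvXw_period (cs : List Char) (p u v : ℕ) (h : u % p = v % p) : pvXw cs p u = pvXw cs p v := by
  simp [pvXw, h]

-- (M)-invariant step: after extending the optimal prefix to length i+1 (because cs[i] < cs[i % p]),
-- every shift of the new period word is ≤ it
lemma pvMstep (cs : List Char) (p i : ℕ) (hp : 1 ≤ p) (hpi : p ≤ i)
    (hagr : ∀ j, j < i → cs.getD j 'a' = pvXw cs p j)
    (hM : ∀ c, 1 ≤ c → c < p → pvLeInf (fun j => pvXw cs p (j + c)) (pvXw cs p))
    (hlt : cs.getD i 'a' < cs.getD (i % p) 'a') :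
    ∀ c, 1 ≤ c → c < i + 1 → pvLeInf (fun j => pvXw cs (i + 1) (j + c)) (pvXw cs (i + 1)) := by
  intro c hc1 hcm
  have hp0 : 0 < p := hp
  -- shifts of the old period word are dominated by it (hM, extended to arbitrary shift amounts)
  have Hs : pvLeInf (fun u => pvXw cs p (u + c)) (pvXw cs p) := by
    have hshift : (fun u => pvXw cs p (u + c)) = (fun u => pvXw cs p (u + c % p)) := by
      funext u
      exact pvXw_period cs p _ _ (by simp [Nat.add_mod])
    rw [hshift]
    rcases Nat.eq_zero_or_pos (c % p) with h0 | hpos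
    · rw [h0]
      exact pvLeInf_refl _
    · exact hM (c % p) hpos (Nat.mod_lt _ hp0)
  have F2 : ∀ u, u < i + 1 → pvXw cs (i + 1) u = cs.getD u 'a' := by
    intro u hu
    rw [pvXw_eq, Nat.mod_eq_of_lt hu]
  have F2x : ∀ u, u < i → pvXw cs (i + 1) u = pvXw cs p u := by
    intro u hu
    rw [F2 u (by omega)]
    exact hagr u hu
  set g0 := i - c with hg0
  have hg0c : g0 + c = i := by omega
  have hg0i : g0 < i := by omega
  -- agreement below j transfers from the new word to the old one
  have transfer : ∀ j, j ≤ g0 → (∀ u, u < j → pvXw cs (i + 1) (u + c) = pvXw cs (i + 1) u) →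
      (∀ u, u < j → pvXw cs p (u + c) = pvXw cs p u) := by
    intro j hjg hj u hu
    have huc : u + c < i := by omega
    calc pvXw cs p (u + c) = pvXw cs (i + 1) (u + c) := (F2x _ huc).symm
      _ = pvXw cs (i + 1) u := hj u hu
      _ = pvXw cs p u := F2x u (by omega)
  intro j hj
  replace hj : ∀ u, u < j → pvXw cs (i + 1) (u + c) = pvXw cs (i + 1) u := hj
  show pvXw cs (i + 1) (j + c) ≤ pvXw cs (i + 1) j
  rcases lt_trichotomy j g0 with hcase | hcase | hcase
  · -- inherited from the old word
    have h1 : pvXw cs p (j + c) ≤ pvXw cs p j := Hs j (transfer j (by omega) hj)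
    have e1 : pvXw cs (i + 1) (j + c) = pvXw cs p (j + c) := F2x _ (by omega)
    have e2 : pvXw cs (i + 1) j = pvXw cs p j := F2x _ (by omega)
    rw [e1, e2]
    exact h1
  · -- at position g0 the new word shows the strictly smaller new character
    have hji : j + c = i := by omega
    have h1 : pvXw cs p (j + c) ≤ pvXw cs p j := Hs j (transfer j (le_of_eq hcase) hj)
    have e1 : pvXw cs (i + 1) (j + c) = cs.getD i 'a' := by
      rw [show j + c = i from hji]
      exact F2 i (by omega)
    have e2 : pvXw cs (i + 1) j = pvXw cs p j := F2x _ (by omega)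
    have e3 : pvXw cs p (j + c) = cs.getD (i % p) 'a' := by rw [show j + c = i from hji]; rfl
    rw [e1, e2]
    rw [e3] at h1
    exact le_of_lt (lt_of_lt_of_le hlt h1)
  · -- agreement cannot reach past g0: contradiction
    exfalso
    have hjg0 := hj g0 hcase
    have e1 : pvXw cs (i + 1) (g0 + c) = cs.getD i 'a' := by
      rw [show g0 + c = i from hg0c]
      exact F2 i (by omega)
    have e2 : pvXw cs (i + 1) g0 = pvXw cs p g0 := F2x _ hg0i
    have h1 : pvXw cs p (g0 + c) ≤ pvXw cs p g0 :=
      Hs g0 (transfer g0 le_rfl (fun u hu => hj u (by omega)))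
    have e3 : pvXw cs p (g0 + c) = cs.getD (i % p) 'a' := by rw [show g0 + c = i from hg0c]; rfl
    rw [e1, e2] at hjg0
    rw [e3] at h1
    have hle : cs.getD (i % p) 'a' ≤ pvXw cs p g0 := h1
    rw [← hjg0] at hle
    exact absurd hlt (not_lt.mpr hle)

-- (B)-invariant step when cs[i] = cs[i % p]: the period-p word is ≤ the repeated prefix of length i+1
lemma pvBstep (cs : List Char) (p i : ℕ) (hp : 1 ≤ p) (hpi : p ≤ i)
    (hagr : ∀ j, j < i + 1 → cs.getD j 'a' = pvXw cs p j)
    (hM : ∀ c, 1 ≤ c → c < p → pvLeInf (fun j => pvXw cs p (j + c)) (pvXw cs p)) :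
    pvLeInf (pvXw cs p) (pvXw cs (i + 1)) := by
  have hp0 : 0 < p := hp
  intro j hj
  rcases Nat.lt_or_ge j (i + 1) with hcase | hcase
  · -- inside the first period both words read cs directly
    have e1 : pvXw cs (i + 1) j = cs.getD j 'a' := by rw [pvXw_eq, Nat.mod_eq_of_lt hcase]
    rw [e1, ← hagr j hcase]
  · -- beyond it: shift by i+1 restarts the long word, shifts the short one by r = (i+1) % p
    set m := i + 1 with hm
    set t := j - m with ht
    have htj : t < j := by omega
    have hjt : j = t + m := by omega
    set r := m % p with hr
    have hstep : ∀ u, u < t → pvXw cs p (u + r) = pvXw cs p u := by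
      intro u hu
      calc pvXw cs p (u + r) = pvXw cs p (u + m) :=
            pvXw_period cs p _ _ (by rw [hr]; simp [Nat.add_mod])
        _ = pvXw cs (i + 1) (u + m) := hj (u + m) (by omega)
        _ = pvXw cs (i + 1) u := pvXw_period cs m _ _ (by simp)
        _ = pvXw cs p u := (hj u (by omega)).symm
    have hxy : pvXw cs (i + 1) j = pvXw cs (i + 1) t := pvXw_period cs m _ _ (by rw [hjt]; simp)
    rcases Nat.eq_zero_or_pos r with h0 | hpos
    · have hm0 : m % p = 0 := by rw [← hr]; exact h0
      have : pvXw cs p j = pvXw cs p t := by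
        refine pvXw_period cs p _ _ ?_
        rw [hjt]
        simp [Nat.add_mod, hm0]
      rw [this, hxy, hj t htj]
    · have h1 := hM r hpos (hr ▸ Nat.mod_lt _ hp0) t hstep
      have e1 : pvXw cs p (t + r) = pvXw cs p j := by
        refine pvXw_period cs p _ _ ?_
        rw [hjt]
        simp [Nat.add_mod, hr]
      rw [hxy, ← hj t htj, ← e1]
      exact h1

-- the greedy loop returns the prefix length whose repetition is minimal among all prefix lengths 1..M
lemma pvNatLoop_spec (cs : List Char) (M : ℕ) :
    ∀ fuel i p, M - i = fuel → 1 ≤ p → p ≤ i → i ≤ M →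
    (∀ j, j < i → cs.getD j 'a' = pvXw cs p j) →
    (∀ q, 1 ≤ q → q ≤ i → pvLeInf (pvXw cs p) (pvXw cs q)) →
    (∀ c, 1 ≤ c → c < p → pvLeInf (fun j => pvXw cs p (j + c)) (pvXw cs p)) →
    1 ≤ pvNatLoop cs M i p ∧ pvNatLoop cs M i p ≤ M ∧
      ∀ q, 1 ≤ q → q ≤ M → pvLeInf (pvXw cs (pvNatLoop cs M i p)) (pvXw cs q) := by
  intro fuel
  induction fuel using Nat.strong_induction_on with
  | _ fuel ih =>
    intro i p hfuel hp hpi hiM hagr hB hM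
    unfold pvNatLoop
    by_cases h : i < M
    · rw [if_pos h]
      by_cases h1 : cs.getD (i % p) 'a' < cs.getD i 'a'
      · -- break: every longer prefix is strictly worse already at position i
        rw [if_pos h1]
        refine ⟨hp, by omega, ?_⟩
        intro q hq1 hq2
        by_cases hqi : q ≤ i
        · exact hB q hq1 hqi
        · refine pvLeInf_of_ltAt _ _ i ?_ ?_
          · intro u hu
            rw [pvXw_eq, pvXw_eq, Nat.mod_eq_of_lt (by omega : u < q)]
            exact ((hagr u hu).symm).trans rfl
          · rw [pvXw_eq, pvXw_eq, Nat.mod_eq_of_lt (by omega : i < q)]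
            exact h1
      · rw [if_neg h1]
        by_cases h2 : cs.getD i 'a' < cs.getD (i % p) 'a'
        · -- extend: the prefix of length i+1 becomes the new optimum
          rw [if_pos h2]
          have hagr' : ∀ j, j < i + 1 → cs.getD j 'a' = pvXw cs (i + 1) j := by
            intro j hj
            rw [pvXw_eq, Nat.mod_eq_of_lt hj]
          have hlt' : pvXw cs (i + 1) i < pvXw cs p i := by
            rw [pvXw_eq, Nat.mod_eq_of_lt (by omega)]
            exact h2
          have hagr2 : ∀ u, u < i → pvXw cs (i + 1) u = pvXw cs p u := by
            intro u hu
            rw [pvXw_eq, Nat.mod_eq_of_lt (by omega)]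
            exact hagr u hu
          refine ih (M - (i + 1)) (by omega) (i + 1) (i + 1) rfl (by omega) le_rfl (by omega)
            hagr' ?_ ?_
          · intro q hq1 hq2
            rcases Nat.lt_or_ge q (i + 1) with hq | hq
            · exact pvLtAt_trans _ _ _ i hagr2 hlt' (hB q hq1 (by omega))
            · have : q = i + 1 := by omega
              subst this
              exact pvLeInf_refl _
          · exact pvMstep cs p i hp hpi hagr hM h2
        · -- equal characters: keep p, agreement extends
          rw [if_neg h2]
          have hagr' : ∀ j, j < i + 1 → cs.getD j 'a' = pvXw cs p j := by
            intro j hj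
            rcases Nat.lt_or_ge j i with hj' | hj'
            · exact hagr j hj'
            · have : j = i := by omega
              subst this
              rw [pvXw_eq]
              exact le_antisymm (not_lt.mp h1) (not_lt.mp h2)
          refine ih (M - (i + 1)) (by omega) (i + 1) p rfl hp (by omega) (by omega) hagr' ?_ hM
          intro q hq1 hq2
          rcases Nat.lt_or_ge q (i + 1) with hq | hq
          · exact hB q hq1 (by omega)
          · have : q = i + 1 := by omega
            subst this
            exact pvBstep cs p i hp hpi hagr' hM
    · rw [if_neg h]
      exact ⟨hp, by omega, fun q hq1 hq2 => hB q hq1 (by omega)⟩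

-- the Int loop of the port computes the Nat loop
lemma pvLoop_eq_nat (cs : List Char) (m : Int) (hm : m ≤ (cs.length : Int)) :
    ∀ fuel (i p : Int), (m - i).toNat = fuel → 1 ≤ p → p ≤ i →
    solveAltLoop cs m i p = ((pvNatLoop cs m.toNat i.toNat p.toNat : ℕ) : Int) := by
  intro fuel
  induction fuel using Nat.strong_induction_on with
  | _ fuel ih =>
    intro i p hfuel hp hpi
    unfold solveAltLoop pvNatLoop
    by_cases h : i < m
    · rw [dif_pos h, if_pos (show i.toNat < m.toNat by omega)]
      have hiN : i = ((i.toNat : ℕ) : Int) := by omega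
      have hpN : p = ((p.toNat : ℕ) : Int) := by omega
      have hiL : i.toNat < cs.length := by omega
      have hmodL : i.toNat % p.toNat < cs.length :=
        lt_of_le_of_lt (Nat.le_of_lt_succ (Nat.lt_succ_of_le (Nat.mod_le _ _))) hiL
      have hc : (PySem.List.pyGet? cs i).getD 'a' = cs.getD i.toNat 'a' := by
        conv_lhs => rw [hiN, PySem.List.pyGet?_natCast]
        rw [List.getD_eq_getElem?_getD]
      have hd : (PySem.List.pyGet? cs (PySem.Int.mod i p)).getD 'a' = cs.getD (i.toNat % p.toNat) 'a' := by
        conv_lhs => rw [hiN, hpN, PySem.Int.mod_natCast, PySem.List.pyGet?_natCast]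
        rw [List.getD_eq_getElem?_getD]
      simp only [hc, hd]
      split_ifs with h1 h2
      · omega
      · have := ih (m - (i+1)).toNat (by omega) (i+1) (i+1) rfl (by omega) le_rfl
        rw [this, show (i+1).toNat = i.toNat + 1 from by omega]
      · have := ih (m - (i+1)).toNat (by omega) (i+1) p rfl hp (by omega)
        rw [this, show (i+1).toNat = i.toNat + 1 from by omega]
    · rw [dif_neg h, if_neg (show ¬ i.toNat < m.toNat by omega)]
      omega

lemma pvRange_map_getD (u : List Char) (R : ℕ) (hR : R ≤ u.length) :
    (List.range R).map (fun j => u.getD j 'a') = u.take R := by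
  apply List.ext_getElem
  · simp [hR]
  · intro j h1 h2
    have hj : j < R := by simpa using h1
    have hl : j < u.length := lt_of_lt_of_le hj hR
    simp [List.getD_eq_getElem?_getD, List.getElem?_eq_getElem hl]

lemma pvFlattenRep (u : List Char) (Q R : ℕ) (hR : R ≤ u.length) :
    (List.replicate Q u).flatten ++ u.take R
      = (List.range (Q * u.length + R)).map (fun j => u.getD (j % u.length) 'a') := by
  induction Q with
  | zero =>
    rw [List.replicate_zero, List.flatten_nil, List.nil_append, Nat.zero_mul, Nat.zero_add]
    rw [← pvRange_map_getD u R hR]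
    refine List.map_congr_left ?_
    intro j hj
    rw [Nat.mod_eq_of_lt (lt_of_lt_of_le (List.mem_range.mp hj) hR)]
  | succ Q ih =>
    rw [show (Q + 1) * u.length + R = u.length + (Q * u.length + R) from by ring]
    rw [List.range_add, List.map_append]
    have hfst : (List.range u.length).map (fun j => u.getD (j % u.length) 'a') = u := by
      calc (List.range u.length).map (fun j => u.getD (j % u.length) 'a')
          = (List.range u.length).map (fun j => u.getD j 'a') :=
            List.map_congr_left fun j hj => by rw [Nat.mod_eq_of_lt (List.mem_range.mp hj)]
        _ = u.take u.length := pvRange_map_getD u u.length le_rfl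
        _ = u := List.take_length
    have hsnd : (List.map (fun x => u.length + x) (List.range (Q * u.length + R))).map
        (fun j => u.getD (j % u.length) 'a')
        = (List.range (Q * u.length + R)).map (fun j => u.getD (j % u.length) 'a') := by
      rw [List.map_map]
      exact List.map_congr_left fun j _ => by simp [Nat.add_mod_left]
    rw [hfst, hsnd, ← ih, List.replicate_succ, List.flatten_cons, List.append_assoc]

lemma pvGetD_take (u : List Char) (t j : ℕ) (hj : j < t) :
    (u.take t).getD j 'a' = u.getD j 'a' := by
  simp [List.getD_eq_getElem?_getD, hj]

-- A's compose(i) builds exactly the first K characters of the repeated prefix of length min i L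
lemma pvCompose_eq (s : String) (k i : Int) (hs : s.toList ≠ []) (hk : 0 ≤ k) (hi : 1 ≤ i) :
    composeA s k i =
      String.ofList (pvRep (pvXw s.toList (min i.toNat s.toList.length)) k.toNat) := by
  obtain ⟨K, rfl⟩ : ∃ K : ℕ, k = (K : Int) := ⟨k.toNat, (Int.toNat_of_nonneg hk).symm⟩
  have hL : 1 ≤ s.toList.length := List.length_pos_iff.mpr hs
  unfold composeA
  have hbase : (PySem.Str.slice s none (some i)).toList = s.toList.take i.toNat := by
    rw [PySem.Str.toList_slice, PySem.Chars.slice_eq_listSlice, PySem.List.slice_to _ (by omega)]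
  rw [hbase]
  show (match PySem.Int.floordiv? (K : Int) ((s.toList.take i.toNat).length : Int),
        PySem.Int.mod? (K : Int) ((s.toList.take i.toNat).length : Int) with
      | some q, some r => String.ofList (PySem.List.pyRepeat (s.toList.take i.toNat) q ++
          PySem.List.slice (s.toList.take i.toNat) none (some r))
      | _, _ => "") = _
  set cs := s.toList with hcs
  set B := (cs.take i.toNat).length with hB
  have hBval : B = min i.toNat cs.length := by simp [hB]
  have hB1 : 1 ≤ B := by
    rw [hBval]
    refine le_min ?_ hL
    omega
  have hB0 : (B : Int) ≠ 0 := by exact_mod_cast Nat.one_le_iff_ne_zero.mp hB1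
  have hfd : PySem.Int.floordiv? (K : Int) (B : Int) = some ((K / B : ℕ) : Int) := by
    rw [show ((K / B : ℕ) : Int) = PySem.Int.floordiv (K : Int) (B : Int) from
      (PySem.Int.floordiv_natCast K B).symm]
    simp [PySem.Int.floordiv?, PySem.Int.floordiv, Nat.one_le_iff_ne_zero.mp hB1]
  have hmd : PySem.Int.mod? (K : Int) (B : Int) = some ((K % B : ℕ) : Int) := by
    rw [show ((K % B : ℕ) : Int) = PySem.Int.mod (K : Int) (B : Int) from
      (PySem.Int.mod_natCast K B).symm]
    simp [PySem.Int.mod?, PySem.Int.mod, Nat.one_le_iff_ne_zero.mp hB1]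
  rw [hfd, hmd]
  simp only []
  congr 1
  have hRle : K % B ≤ (cs.take i.toNat).length := le_of_lt (Nat.mod_lt _ (by omega))
  have hsl : PySem.List.slice (cs.take i.toNat) none (some ((K % B : ℕ) : Int))
      = (cs.take i.toNat).take (K % B) := by
    rw [PySem.List.slice_to _ (by omega), Int.toNat_natCast]
  rw [hsl]
  have hrep : PySem.List.pyRepeat (cs.take i.toNat) ((K / B : ℕ) : Int)
      = (List.replicate (K / B) (cs.take i.toNat)).flatten := by
    rw [PySem.List.pyRepeat, Int.toNat_natCast]
  rw [hrep, pvFlattenRep _ (K / B) (K % B) hRle]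
  rw [show K / B * (cs.take i.toNat).length + K % B = K from by
    rw [← hB, Nat.mul_comm]; exact Nat.div_add_mod K B]
  refine List.map_congr_left ?_
  intro j _
  have hjB : j % B < B := Nat.mod_lt _ (by omega)
  rw [pvXw_eq, ← hBval]
  exact pvGetD_take cs i.toNat (j % B) (lt_of_lt_of_le hjB (by rw [hBval]; exact min_le_left _ _))

-- B's final build is the first K characters of the repeated prefix of length p
lemma pvBuild_eq (cs : List Char) (k p : Int) (hp : 1 ≤ p)
    (hpL : p.toNat ≤ cs.length) :
    PySem.List.slice
      (PySem.List.pyRepeat (PySem.List.slice cs none (some p)) (PySem.Int.floordiv k p + 1))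
      none (some k)
      = pvRep (pvXw cs p.toNat) k.toNat := by
  obtain ⟨P, rfl⟩ : ∃ P : ℕ, p = (P : Int) := ⟨p.toNat, (Int.toNat_of_nonneg (by omega)).symm⟩
  have hP : 0 < P := by exact_mod_cast hp
  have hPL : P ≤ cs.length := by simpa using hpL
  rcases lt_or_ge k 0 with hk | hk
  · -- k < 0: the repetition count k // p + 1 is ≤ 0, so both sides are empty
    have hneg : PySem.Int.floordiv k (P : Int) + 1 ≤ 0 := by
      have := (PySem.Int.floordiv_lt_iff_lt_mul (a := k) (b := (P : Int)) (q := 0)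
        (by exact_mod_cast hP)).mpr (by simpa using hk)
      omega
    have h0 : PySem.List.pyRepeat (PySem.List.slice cs none (some (P : Int)))
        (PySem.Int.floordiv k (P : Int) + 1) = [] := by
      rw [PySem.List.pyRepeat, show (PySem.Int.floordiv k (P : Int) + 1).toNat = 0 from by omega]
      simp
    rw [h0, show k.toNat = 0 from by omega]
    simp [pvRep, PySem.List.slice]
  · obtain ⟨K, rfl⟩ : ∃ K : ℕ, k = (K : Int) := ⟨k.toNat, (Int.toNat_of_nonneg hk).symm⟩
    have ht : PySem.List.slice cs none (some ((P : ℕ) : Int)) = cs.take P := by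
      rw [PySem.List.slice_to _ (by omega), Int.toNat_natCast]
    have htlen : (cs.take P).length = P := by simp [hPL]
    have hreps : PySem.Int.floordiv ((K : ℕ) : Int) ((P : ℕ) : Int) + 1 = ((K / P + 1 : ℕ) : Int) := by
      rw [PySem.Int.floordiv_natCast]
      push_cast
      ring
    rw [ht, hreps, PySem.List.pyRepeat, Int.toNat_natCast]
    have hrep := pvFlattenRep (cs.take P) (K / P + 1) 0 (Nat.zero_le _)
    rw [List.take_zero, List.append_nil, Nat.add_zero] at hrep
    rw [hrep, htlen]
    rw [Nat.add_zero]
    have hKN : K ≤ (K / P + 1) * P := by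
      have h1 := Nat.div_add_mod K P
      have h2 := Nat.mod_lt K hP
      have h3 : (K / P + 1) * P = K / P * P + P := by ring
      have h4 : P * (K / P) = K / P * P := Nat.mul_comm _ _
      omega
    rw [PySem.List.slice_to _ (by omega), Int.toNat_natCast, ← List.map_take, List.take_range,
      Nat.min_eq_left hKN]
    refine List.map_congr_left ?_
    intro j _
    have hjP : j % P < P := Nat.mod_lt _ hP
    rw [pvGetD_take cs P (j % P) hjP]
    rfl

-- bounds for the greedy result, for any M ≤ |cs|
lemma pvNatLoop_bounds (cs : List Char) (M : ℕ) (hML : M ≤ cs.length) (hL : 1 ≤ cs.length) :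
    1 ≤ pvNatLoop cs M 1 1 ∧ pvNatLoop cs M 1 1 ≤ cs.length := by
  rcases Nat.eq_zero_or_pos M with h0 | hM1
  · rw [h0, show pvNatLoop cs 0 1 1 = 1 from by simp [pvNatLoop]]
    exact ⟨le_rfl, hL⟩
  · obtain ⟨h1, h2, _⟩ := pvNatLoop_spec cs M (M - 1) 1 1 rfl le_rfl le_rfl hM1
      (by intro j hj; rw [show j = 0 from by omega]; rfl)
      (by intro q hq1 hq2; rw [show q = 1 from by omega]; exact pvLeInf_refl _)
      (by intro c hc1 hc2; omega)
    exact ⟨h1, le_trans h2 hML⟩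

-- with an empty seed the running minimum stays empty (Python: "" is ≤ every string)
lemma pvFoldl_keep_nil (f : Int → String) (l : List Int) :
    l.foldl (fun b a => if f a < b then f a else b) "" = "" := by
  induction l with
  | nil => rfl
  | cons a t ih =>
    have hnil : ¬ f a < "" := by
      rw [String.lt_iff_toList_lt]
      simp
    simpa [hnil] using ih

lemma pvRep_one (cs : List Char) (K : ℕ) :
    pvRep (pvXw cs 1) K = List.replicate K (cs.getD 0 'a') := by
  rw [List.eq_replicate_iff]
  constructor
  · simp [pvRep]
  · intro b hb
    rcases List.mem_map.mp hb with ⟨j, _, rfl⟩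
    simp [pvXw, Nat.mod_one]

-- ===== VERDICT (by name: the statement is the Claim_ definition above) =====
theorem solve_spec : Claim_equal_solve := by
  unfold Claim_equal_solve
  intro n k s _ hpre
  unfold Spec_solve Pre_solve at *
  have hs : s.toList ≠ [] := by
    intro h
    apply hpre
    have h2 := congrArg String.ofList h
    rw [String.ofList_toList] at h2
    simpa using h2
  set cs := s.toList with hcs
  have hL : 1 ≤ cs.length := List.length_pos_iff.mpr hs
  have hget0 : cs[0]? = some (cs.getD 0 'a') := by
    have : ∀ (l : List Char), l ≠ [] → l[0]? = some (l.getD 0 'a') := by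
      intro l hl
      cases l with
      | nil => exact absurd rfl hl
      | cons a t => simp [List.getD]
    exact this cs hs
  have hc0 : PySem.Str.pyGet? s 0 = some (cs.getD 0 'a') := by
    rw [show (0 : Int) = ((0 : ℕ) : Int) from rfl, PySem.Str.pyGet?_natCast]
    exact hget0
  -- B side first: the loop result
  have hmL : min n (cs.length : Int) ≤ (cs.length : Int) := min_le_right _ _
  have hloop : solveAltLoop cs (min n (cs.length : Int)) 1 1 =
      ((pvNatLoop cs (min n (cs.length : Int)).toNat 1 1 : ℕ) : Int) :=
    pvLoop_eq_nat cs _ hmL _ 1 1 rfl le_rfl le_rfl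
  rcases lt_or_ge k 0 with hk | hk
  · -- k < 0: both programs return ""
    have hA : solve n k s = "" := by
      unfold solve
      rw [hc0]
      show List.foldl _ (String.ofList (PySem.List.pyRepeat [cs.getD 0 'a'] k)) _ = ""
      rw [show PySem.List.pyRepeat [cs.getD 0 'a'] k = [] from by
        rw [PySem.List.pyRepeat_singleton, show k.toNat = 0 from by omega, List.replicate_zero]]
      show List.foldl (fun b a => if composeA s k a < b then composeA s k a else b)
        (String.ofList []) _ = ""
      exact pvFoldl_keep_nil _ _
    have hB : solve_alt n k s = "" := by
      obtain ⟨hb1, hb2⟩ := pvNatLoop_bounds cs (min n (cs.length : Int)).toNat (by omega) hL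
      unfold solve_alt
      show String.ofList (PySem.List.slice
          (PySem.List.pyRepeat
            (PySem.List.slice cs none (some (solveAltLoop cs (min n (cs.length : Int)) 1 1)))
            (PySem.Int.floordiv k (solveAltLoop cs (min n (cs.length : Int)) 1 1) + 1))
          none (some k)) = _
      rw [hloop]
      rw [pvBuild_eq cs k ((pvNatLoop cs (min n (cs.length : Int)).toNat 1 1 : ℕ) : Int)
        (by exact_mod_cast hb1) (by simpa using hb2)]
      rw [show k.toNat = 0 from by omega]
      rfl
    rw [hA, hB]
  · -- 0 ≤ k
    set K := k.toNat with hK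
    have hkK : k = (K : Int) := by omega
    rcases lt_or_ge n 1 with hn | hn
    · -- n ≤ 0: A never enters its loop, B's greedy loop has empty range; both give s[0] * k
      have hA : solve n k s = String.ofList (pvRep (pvXw cs 1) K) := by
        unfold solve
        rw [hc0]
        show List.foldl _ (String.ofList (PySem.List.pyRepeat [cs.getD 0 'a'] k)) _ = _
        rw [show PySem.List.pyRange 1 (n + 1) 1 = [] from by simp [PySem.List.pyRange]; omega]
        rw [List.foldl_nil, PySem.List.pyRepeat_singleton, pvRep_one]
      have hB : solve_alt n k s = String.ofList (pvRep (pvXw cs 1) K) := by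
        unfold solve_alt
        show String.ofList (PySem.List.slice
            (PySem.List.pyRepeat
              (PySem.List.slice cs none (some (solveAltLoop cs (min n (cs.length : Int)) 1 1)))
              (PySem.Int.floordiv k (solveAltLoop cs (min n (cs.length : Int)) 1 1) + 1))
            none (some k)) = _
        rw [hloop]
        rw [show (min n (cs.length : Int)).toNat = 0 from by omega]
        rw [show pvNatLoop cs 0 1 1 = 1 from by simp [pvNatLoop]]
        rw [pvBuild_eq cs k (((1 : ℕ) : Int)) (by exact_mod_cast le_refl 1) (by simpa using hL)]
        rw [Int.toNat_natCast]
      rw [hA, hB]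
    · -- main case: n ≥ 1
      set M := (min n (cs.length : Int)).toNat with hM
      have hMval : M = min n.toNat cs.length := by omega
      have hM1 : 1 ≤ M := by omega
      have hML : M ≤ cs.length := by omega
      obtain ⟨hP1, hPM, hPmin⟩ := pvNatLoop_spec cs M (M - 1) 1 1 rfl le_rfl le_rfl hM1
        (by intro j hj; rw [show j = 0 from by omega]; rfl)
        (by intro q hq1 hq2; rw [show q = 1 from by omega]; exact pvLeInf_refl _)
        (by intro c hc1 hc2; omega)
      set P := pvNatLoop cs M 1 1 with hPdef
      have hPL : P ≤ cs.length := le_trans hPM hML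
      have hB : solve_alt n k s = String.ofList (pvRep (pvXw cs P) K) := by
        unfold solve_alt
        show String.ofList (PySem.List.slice
            (PySem.List.pyRepeat
              (PySem.List.slice cs none (some (solveAltLoop cs (min n (cs.length : Int)) 1 1)))
              (PySem.Int.floordiv k (solveAltLoop cs (min n (cs.length : Int)) 1 1) + 1))
            none (some k)) = _
        rw [hloop]
        rw [pvBuild_eq cs k ((P : ℕ) : Int) (by exact_mod_cast hP1) (by simpa using hPL)]
        rw [Int.toNat_natCast]
      have hans0 : String.ofList (PySem.List.pyRepeat [cs.getD 0 'a'] k) =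
          String.ofList (pvRep (pvXw cs 1) K) := by
        rw [PySem.List.pyRepeat_singleton, pvRep_one, hK]
      have hA : solve n k s = String.ofList (pvRep (pvXw cs P) K) := by
        unfold solve
        rw [hc0]
        show List.foldl (fun b a => if composeA s k a < b then composeA s k a else b)
          (String.ofList (PySem.List.pyRepeat [cs.getD 0 'a'] k)) (PySem.List.pyRange 1 (n + 1) 1)
            = _
        rw [hans0]
        refine pvFoldl_argmin (composeA s k) _ _ _ (Or.inr ⟨(P : Int), ?_, ?_⟩) ?_ ?_
        · rw [PySem.List.mem_pyRange_one]
          omega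
        · rw [pvCompose_eq s k (P : Int) hs (by omega) (by exact_mod_cast hP1)]
          rw [show ((P : Int)).toNat = P from by omega, min_eq_left hPL, ← hcs]
        · exact pvStr_le_of_leInf _ _ K (hPmin 1 le_rfl hM1)
        · intro a ha
          rw [PySem.List.mem_pyRange_one] at ha
          rw [pvCompose_eq s k a hs (by omega) (by omega), ← hcs]
          exact pvStr_le_of_leInf _ _ K
            (hPmin (min a.toNat cs.length) (by omega) (by omega))
      rw [hA, hB]
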